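-- pv_equiv track=rewrite | github.com/rstar24/playground | DSA/code_forces/round_972_A.py | result
-- ===== SOURCE A (Python) =====
-- def result(a):
--     base = "aeiou"
--     if (a == 1):
--         return "a"
--
--     elif (a <=5 ):
--         s1 = ""
--         for i in range(a):
--             s1 += base[i]
--
--         return s1
--
--     else:
--         s2 = ""
--         s2 += base
--         t = a-5
--         t2 = t//5
--         t3 = t%5
--         for i in range(t2):
--             s2 += base
--
--         for i in range(t3):
--             s2 += base[i]
--
--         return s2
-- ===== SOURCE B (Python) =====
-- def result(a):
--     return ("aeiou" * ((a + 4) // 5))[:a]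
-- ===== Notes on version B (the rewrite author's own statement) =====
-- stated objective: simpler
-- what changed: Replaces the three-way branch with character-appending loops by a single expression: repeat "aeiou" ceil(a/5) times with str multiplication and slice to length a.
import Mathlib
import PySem

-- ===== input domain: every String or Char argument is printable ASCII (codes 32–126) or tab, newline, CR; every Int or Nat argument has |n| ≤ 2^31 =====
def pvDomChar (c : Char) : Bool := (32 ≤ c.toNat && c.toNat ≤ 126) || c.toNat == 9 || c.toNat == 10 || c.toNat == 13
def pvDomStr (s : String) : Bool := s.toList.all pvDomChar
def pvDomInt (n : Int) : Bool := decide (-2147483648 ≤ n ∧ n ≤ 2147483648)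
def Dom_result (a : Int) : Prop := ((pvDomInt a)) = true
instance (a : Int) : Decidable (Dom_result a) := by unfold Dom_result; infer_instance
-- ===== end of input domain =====

-- B replaces A's three-way branch and character loops by one expression:
-- "aeiou" repeated ceil(a/5) times, sliced to length a.  Objective: simpler.

-- the string literal "aeiou" as characters, shared by both ports
def bc : List Char := ['a', 'e', 'i', 'o', 'u']

-- ===== PORT A =====
-- base[i] is ported with PySem.List.pyGet?; the none case is unreachable (0 ≤ i < 5 always).
def result (a : Int) : String :=
  if a == 1 then "a"
  else if a ≤ 5 then
    String.ofList ((PySem.List.pyRange 0 a 1).foldl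
      (fun s i => s ++ ((PySem.List.pyGet? bc i).elim [] (fun c => [c]))) [])
  else
    -- t = a - 5, t2 = t // 5, t3 = t % 5 inlined
    String.ofList
      ((PySem.List.pyRange 0 (PySem.Int.mod (a - 5) 5) 1).foldl
        (fun s i => s ++ ((PySem.List.pyGet? bc i).elim [] (fun c => [c])))
        ((PySem.List.pyRange 0 (PySem.Int.floordiv (a - 5) 5) 1).foldl
          (fun s _ => s ++ bc) ([] ++ bc)))

-- ===== PORT B =====
-- "aeiou" * n: Python gives "" for n ≤ 0, exactly what .toNat-many copies give.
def result_alt (a : Int) : String :=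
  String.ofList
    (PySem.List.slice
      (List.flatten (List.replicate (PySem.Int.floordiv (a + 4) 5).toNat bc))
      none (some a))

-- ===== PRECONDITION & SPEC =====
def Spec_result (a : Int) (out : String) : Prop := out = result_alt a
instance (a : Int) (out : String) : Decidable (Spec_result a out) := by unfold Spec_result; infer_instance

-- ===== CLAIM (what is proved, stated in full; the proofs are below) =====
def Claim_equal_result : Prop := ∀ (a : Int), Dom_result a → Spec_result a (result a)

-- ===== LEMMAS AND PROOFS =====

-- k copies of "aeiou"
def rep (k : Nat) : List Char := List.flatten (List.replicate k bc)

theorem rep_succ (k : Nat) : rep (k + 1) = bc ++ rep k := by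
  simp [rep, List.replicate_succ]

-- slicing to length n ≤ 5k out of k copies
theorem take_rep (c : Nat) : ∀ n : Nat, n ≤ 5 * c →
    (rep c).take n = rep (n / 5) ++ bc.take (n % 5) := by
  induction c with
  | zero =>
    intro n hn
    have : n = 0 := by omega
    simp [this, rep]
  | succ c ih =>
    intro n hn
    rw [rep_succ]
    by_cases h5 : n < 5
    · rw [List.take_append_of_le_length (by simp [bc]; omega)]
      have h1 : n / 5 = 0 := Nat.div_eq_of_lt h5
      have h2 : n % 5 = n := Nat.mod_eq_of_lt h5
      simp [h1, h2, rep]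
    · have hb : bc.length = 5 := by decide
      rw [List.take_append, hb, List.take_of_length_le (by omega)]
      rw [ih (n - 5) (by omega)]
      have h1 : n / 5 = (n - 5) / 5 + 1 := by omega
      have h2 : n % 5 = (n - 5) % 5 := by omega
      rw [h1, h2, rep_succ]
      simp

-- the loop 'for i in range(t2): s += base' appends t2 copies
theorem loop1 (l : List Int) : ∀ s0 : List Char,
    l.foldl (fun s (_ : Int) => s ++ bc) s0 = s0 ++ rep l.length := by
  induction l with
  | nil => intro s0; simp [rep]
  | cons x xs ih =>
    intro s0
    simp only [List.foldl_cons, List.length_cons, ih, rep_succ]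
    simp

-- the loop 'for i in range(t3): s += base[i]' appends the first t3 vowels (t3 ≤ 5)
theorem loop2 (t3 : Int) (h0 : 0 ≤ t3) (h5 : t3 ≤ 5) (s0 : List Char) :
    (PySem.List.pyRange 0 t3 1).foldl
      (fun s i => s ++ ((PySem.List.pyGet? bc i).elim [] (fun c => [c]))) s0
      = s0 ++ bc.take t3.toNat := by
  interval_cases t3
  · rw [show PySem.List.pyRange 0 0 1 = [] from by decide]; simp
  · rw [show PySem.List.pyRange 0 1 1 = [0] from by decide]
    simp [PySem.List.pyGet?, PySem.List.pyIdx?, bc]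
  · rw [show PySem.List.pyRange 0 2 1 = [0, 1] from by decide]
    simp [PySem.List.pyGet?, PySem.List.pyIdx?, bc]
  · rw [show PySem.List.pyRange 0 3 1 = [0, 1, 2] from by decide]
    simp [PySem.List.pyGet?, PySem.List.pyIdx?, bc]
  · rw [show PySem.List.pyRange 0 4 1 = [0, 1, 2, 3] from by decide]
    simp [PySem.List.pyGet?, PySem.List.pyIdx?, bc]
  · rw [show PySem.List.pyRange 0 5 1 = [0, 1, 2, 3, 4] from by decide]
    simp [PySem.List.pyGet?, PySem.List.pyIdx?, bc]

-- ===== VERDICT (by name: the statement is the Claim_ definition above) =====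
theorem result_spec : Claim_equal_result := by
  intro a _
  unfold Spec_result result result_alt
  by_cases hneg : a ≤ 0
  · -- both sides are the empty string
    have h1 : (a == 1) = false := by simp; omega
    have hle : a ≤ 5 := by omega
    have hc : (PySem.Int.floordiv (a + 4) 5).toNat = 0 := by
      have := (PySem.Int.floordiv_lt_iff_lt_mul (a := a + 4) (b := 5) (q := 1) (by omega)).mpr (by omega)
      omega
    rw [h1, if_neg (by simp), if_pos hle, PySem.List.pyRange_one_eq_nil hneg, hc]
    simp [PySem.List.slice, PySem.List.clampIdx]
  · push Not at hneg
    by_cases hsmall : a ≤ 5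
    · -- 1 ≤ a ≤ 5 : five literal cases
      interval_cases a <;> decide
    · -- a > 5
      push Not at hsmall
      have h1 : (a == 1) = false := by simp; omega
      rw [h1, if_neg (by simp), if_neg (by omega)]
      -- A side
      have ht2 : (0:Int) ≤ PySem.Int.floordiv (a - 5) 5 := by
        have := (PySem.Int.le_floordiv_iff_mul_le (a := a - 5) (b := 5) (q := 0) (by omega)).mpr (by omega)
        exact this
      have ht3lt : PySem.Int.mod (a - 5) 5 < 5 := PySem.Int.mod_lt _ (by omega)
      have ht3nn : (0:Int) ≤ PySem.Int.mod (a - 5) 5 := PySem.Int.mod_nonneg _ (by omega)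
      rw [loop1, loop2 _ ht3nn (le_of_lt ht3lt)]
      rw [PySem.List.length_pyRange_one]
      -- B side
      have hcpos : (0:Int) ≤ a := by omega
      rw [PySem.List.slice_to _ hcpos]
      rw [show (List.flatten (List.replicate (PySem.Int.floordiv (a + 4) 5).toNat bc)) = rep (PySem.Int.floordiv (a + 4) 5).toNat from rfl]
      -- arithmetic identities
      have hfd : PySem.Int.floordiv (a - 5) 5 = (a - 5) / 5 :=
        PySem.Int.floordiv_eq_ediv_of_pos (by omega)
      have hmd : PySem.Int.mod (a - 5) 5 = (a - 5) % 5 :=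
        PySem.Int.mod_eq_emod_of_pos (by omega)
      have hfc : PySem.Int.floordiv (a + 4) 5 = (a + 4) / 5 :=
        PySem.Int.floordiv_eq_ediv_of_pos (by omega)
      rw [take_rep _ _ (by rw [hfc]; omega)]
      have e1 : a.toNat / 5 = (PySem.Int.floordiv (a - 5) 5 - 0).toNat + 1 := by rw [hfd]; omega
      have e2 : a.toNat % 5 = (PySem.Int.mod (a - 5) 5).toNat := by rw [hmd]; omega
      rw [e1, e2, rep_succ]
      simp
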